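-- pv_equiv track=rewrite | github.com/abdmoiz18/mine-disaster-response | algorithms/main_final.py | path_to_moves
-- ===== SOURCE A (Python) =====
-- def path_to_moves(path_coords):
--     """Converts coordinates to simple F/L/R moves (Assuming NORTH start)."""
--     if len(path_coords) < 2: return []
--
--     moves = []
--     # Direction mappings: 0:N, 1:E, 2:S, 3:W
--     current_facing = 0
--
--     # We start at index 0, moving to index 1
--     for i in range(len(path_coords) - 1):
--         cx, cy = path_coords[i]
--         nx, ny = path_coords[i+1]
--
--         dx = nx - cx
--         dy = ny - cy
--
--         # Determine needed facing
--         if dy == 1: needed = 0   # N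
--         elif dx == 1: needed = 1 # E
--         elif dy == -1: needed = 2 # S
--         elif dx == -1: needed = 3 # W
--         else: needed = current_facing # Should not happen
--
--         # Calculate Turn
--         diff = (needed - current_facing) % 4
--         if diff == 1: moves.append('R')
--         elif diff == 2: moves.extend(['R', 'R'])
--         elif diff == 3: moves.append('L')
--
--         # Move Forward
--         moves.append('F')
--         current_facing = needed
--
--     return moves
-- ===== SOURCE B (Python) =====
-- def path_to_moves(path_coords):
--     """Two-pass version: first compute the facing after each step, then emit turns + 'F'."""
--     if len(path_coords) < 2:
--         return []
--     # Pass 1: facing needed for each step (carrying previous facing for non-unit deltas)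
--     facings = []
--     prev = 0
--     for (cx, cy), (nx, ny) in zip(path_coords, path_coords[1:]):
--         dx, dy = nx - cx, ny - cy
--         if dy == 1:
--             f = 0
--         elif dx == 1:
--             f = 1
--         elif dy == -1:
--             f = 2
--         elif dx == -1:
--             f = 3
--         else:
--             f = prev
--         facings.append(f)
--         prev = f
--     # Pass 2: emit turn moves then 'F' for each facing transition
--     moves = []
--     prev = 0
--     for f in facings:
--         d = (f - prev) % 4
--         if d == 1:
--             moves.append('R')
--         elif d == 2:
--             moves.extend(['R', 'R'])
--         elif d == 3:
--             moves.append('L')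
--         moves.append('F')
--         prev = f
--     return moves
-- ===== Notes on version B (the rewrite author's own statement) =====
-- stated objective: alternative
-- what changed: B splits A's single fused loop into two passes: one pass derives the facing-direction list from consecutive coordinate deltas, a second pass over that list emits the turn moves and 'F's.
import Mathlib
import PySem

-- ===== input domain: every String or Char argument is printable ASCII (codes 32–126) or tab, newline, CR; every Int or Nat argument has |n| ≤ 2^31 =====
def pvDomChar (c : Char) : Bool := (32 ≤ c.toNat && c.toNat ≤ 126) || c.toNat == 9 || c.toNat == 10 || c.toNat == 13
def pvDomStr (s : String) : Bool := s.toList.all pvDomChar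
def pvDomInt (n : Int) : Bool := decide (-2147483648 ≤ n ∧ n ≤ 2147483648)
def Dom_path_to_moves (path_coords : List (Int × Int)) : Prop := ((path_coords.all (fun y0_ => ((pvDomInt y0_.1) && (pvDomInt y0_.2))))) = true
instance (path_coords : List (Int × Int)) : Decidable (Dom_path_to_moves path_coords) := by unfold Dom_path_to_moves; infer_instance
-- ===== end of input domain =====

-- B replaces A's fused loop by two passes (facings list, then turn emission); objective: alternative decomposition, same cost.

-- ===== PORT A =====
-- literal transliteration of A: one fold over range(len-1), state = (moves, current_facing)
def path_to_moves (path_coords : List (Int × Int)) : List String :=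
  if path_coords.length < 2 then [] else
    ((PySem.List.pyRange 0 ((path_coords.length : Int) - 1) 1).foldl
      (fun (st : List String × Int) i =>
        let c := PySem.List.pyGetD path_coords i (0, 0)
        let n := PySem.List.pyGetD path_coords (i + 1) (0, 0)
        let dx := n.1 - c.1
        let dy := n.2 - c.2
        let needed : Int :=
          if dy = 1 then 0 else if dx = 1 then 1 else if dy = -1 then 2
          else if dx = -1 then 3 else st.2
        let diff := PySem.Int.mod (needed - st.2) 4
        let moves :=
          if diff = 1 then st.1 ++ ["R"]
          else if diff = 2 then st.1 ++ ["R", "R"]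
          else if diff = 3 then st.1 ++ ["L"] else st.1
        (moves ++ ["F"], needed))
      ([], 0)).1

-- ===== PORT B =====
-- B-side helper: facing required by one step (A's if-chain order), with prev as fallback
def pvNeededFacing (c n : Int × Int) (prev : Int) : Int :=
  if n.2 - c.2 = 1 then 0 else if n.1 - c.1 = 1 then 1
  else if n.2 - c.2 = -1 then 2 else if n.1 - c.1 = -1 then 3 else prev

-- B-side helper: pass 1, the loop over zip(path, path[1:]) carrying prev
def pvFacings : List (Int × Int) → Int → List Int
  | a :: b :: rest, prev =>
    let f := pvNeededFacing a b prev
    f :: pvFacings (b :: rest) f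
  | _, _ => []

def path_to_moves_alt (path_coords : List (Int × Int)) : List String :=
  if path_coords.length < 2 then [] else
    ((pvFacings path_coords 0).foldl
      (fun (st : List String × Int) f =>
        let d := PySem.Int.mod (f - st.2) 4
        ((st.1 ++
          (if d = 1 then ["R"] else if d = 2 then ["R", "R"]
           else if d = 3 then ["L"] else [])) ++ ["F"], f))
      ([], 0)).1

-- ===== PRECONDITION & SPEC =====
def Spec_path_to_moves (path_coords : List (Int × Int)) (out : List String) : Prop := out = path_to_moves_alt path_coords
instance (path_coords : List (Int × Int)) (out : List String) : Decidable (Spec_path_to_moves path_coords out) := by unfold Spec_path_to_moves; infer_instance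

-- ===== CLAIM (what is proved, stated in full; the proofs are below) =====
def Claim_equal_path_to_moves : Prop := ∀ (path_coords : List (Int × Int)), Dom_path_to_moves path_coords → Spec_path_to_moves path_coords (path_to_moves path_coords)

-- ===== LEMMAS AND PROOFS =====

-- A's loop body, abstracted over the two coordinates it reads
def pvStepA (st : List String × Int) (c n : Int × Int) : List String × Int :=
  let dx := n.1 - c.1
  let dy := n.2 - c.2
  let needed : Int :=
    if dy = 1 then 0 else if dx = 1 then 1 else if dy = -1 then 2
    else if dx = -1 then 3 else st.2
  let diff := PySem.Int.mod (needed - st.2) 4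
  let moves :=
    if diff = 1 then st.1 ++ ["R"]
    else if diff = 2 then st.1 ++ ["R", "R"]
    else if diff = 3 then st.1 ++ ["L"] else st.1
  (moves ++ ["F"], needed)

-- B's second-pass loop body
def pvStepB (st : List String × Int) (f : Int) : List String × Int :=
  let d := PySem.Int.mod (f - st.2) 4
  ((st.1 ++
    (if d = 1 then ["R"] else if d = 2 then ["R", "R"]
     else if d = 3 then ["L"] else [])) ++ ["F"], f)

-- folding A's body over adjacent pairs of the list
def pvAdjFold : List (Int × Int) → (List String × Int) → (List String × Int)
  | a :: b :: rest, st => pvAdjFold (b :: rest) (pvStepA st a b)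
  | _, st => st

lemma pvStepA_eq_stepB (st : List String × Int) (a b : Int × Int) :
    pvStepA st a b = pvStepB st (pvNeededFacing a b st.2) := by
  simp only [pvStepA, pvStepB, pvNeededFacing]
  split_ifs <;> simp

lemma pvStepB_snd (st : List String × Int) (f : Int) : (pvStepB st f).2 = f := rfl

lemma pvAdjFold_eq_foldB :
    ∀ (xs : List (Int × Int)) (st : List String × Int),
      pvAdjFold xs st = (pvFacings xs st.2).foldl pvStepB st
  | [], _ => rfl
  | [_], _ => rfl
  | a :: b :: rest, st => by
    have h2 : (pvStepA st a b).2 = pvNeededFacing a b st.2 := by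
      rw [pvStepA_eq_stepB, pvStepB_snd]
    calc pvAdjFold (a :: b :: rest) st
        = pvAdjFold (b :: rest) (pvStepA st a b) := rfl
      _ = (pvFacings (b :: rest) (pvStepA st a b).2).foldl pvStepB (pvStepA st a b) :=
          pvAdjFold_eq_foldB (b :: rest) (pvStepA st a b)
      _ = (pvFacings (a :: b :: rest) st.2).foldl pvStepB st := by
          rw [h2, pvStepA_eq_stepB]; rfl

-- A's index fold over range(len-1) is the adjacent-pair fold
lemma pvFold_range_eq_adjFold :
    ∀ (xs : List (Int × Int)) (st : List String × Int),
      (PySem.List.pyRange 0 ((xs.length : Int) - 1) 1).foldl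
        (fun st i => pvStepA st (PySem.List.pyGetD xs i (0, 0))
                              (PySem.List.pyGetD xs (i + 1) (0, 0))) st
      = pvAdjFold xs st
  | [], st => by
    rw [PySem.List.pyRange_one_eq_nil (by simp)]; rfl
  | [x], st => by
    rw [PySem.List.pyRange_one_eq_nil (by simp)]; rfl
  | a :: b :: rest, st => by
    have hlen : ((a :: b :: rest).length : Int) - 1 = (rest.length : Int) + 1 := by
      push_cast [List.length_cons]; ring
    rw [hlen, PySem.List.pyRange_one_cons (by omega)]
    simp only [List.foldl_cons, zero_add]
    have h0 : pvStepA st (PySem.List.pyGetD (a :: b :: rest) (0 : Int) (0, 0))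
                        (PySem.List.pyGetD (a :: b :: rest) (1 : Int) (0, 0))
            = pvStepA st a b := by
      norm_num [PySem.List.pyGetD_ofNat']
    have hshift : PySem.List.pyRange 1 ((rest.length : Int) + 1) 1
        = (PySem.List.pyRange 0 ((rest.length : Int)) 1).map (· + 1) := by
      rw [PySem.List.pyRange_one, PySem.List.pyRange_one]
      simp [List.map_map, Function.comp_def, add_comm]
    rw [h0, hshift, List.foldl_map]
    have hfold :
        (PySem.List.pyRange 0 ((rest.length : Int)) 1).foldl
          (fun st' k => pvStepA st' (PySem.List.pyGetD (a :: b :: rest) (k + 1) (0, 0))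
                                   (PySem.List.pyGetD (a :: b :: rest) (k + 1 + 1) (0, 0)))
          (pvStepA st a b)
        = (PySem.List.pyRange 0 ((rest.length : Int)) 1).foldl
          (fun st' k => pvStepA st' (PySem.List.pyGetD (b :: rest) k (0, 0))
                                   (PySem.List.pyGetD (b :: rest) (k + 1) (0, 0)))
          (pvStepA st a b) := by
      apply PySem.List.foldl_congr_mem
      intro st' k hk
      have hk0 : 0 ≤ k := (PySem.List.mem_pyRange_one.mp hk).1
      obtain ⟨m, rfl⟩ := Int.eq_ofNat_of_zero_le hk0
      have h1 : (m : Int) + 1 = ((m + 1 : Nat) : Int) := by push_cast; ring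
      rw [h1]
      have h2 : (((m + 1 : Nat) : Int)) + 1 = ((m + 2 : Nat) : Int) := by push_cast; ring
      rw [h2, PySem.List.pyGetD_natCast, PySem.List.pyGetD_natCast,
          PySem.List.pyGetD_natCast, PySem.List.pyGetD_natCast]
      simp
    have hb2 : ((b :: rest).length : Int) - 1 = (rest.length : Int) := by simp
    calc _ = pvAdjFold (b :: rest) (pvStepA st a b) := by
          rw [hfold, ← hb2]
          exact pvFold_range_eq_adjFold (b :: rest) (pvStepA st a b)
      _ = pvAdjFold (a :: b :: rest) st := rfl

-- ===== VERDICT (by name: the statement is the Claim_ definition above) =====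
theorem path_to_moves_spec : Claim_equal_path_to_moves := by
  intro path_coords _
  unfold Spec_path_to_moves path_to_moves path_to_moves_alt
  by_cases h : path_coords.length < 2
  · simp [h]
  · simp only [h, if_false]
    rw [show (fun (st : List String × Int) i =>
        let c := PySem.List.pyGetD path_coords i (0, 0)
        let n := PySem.List.pyGetD path_coords (i + 1) (0, 0)
        let dx := n.1 - c.1
        let dy := n.2 - c.2
        let needed : Int :=
          if dy = 1 then 0 else if dx = 1 then 1 else if dy = -1 then 2
          else if dx = -1 then 3 else st.2
        let diff := PySem.Int.mod (needed - st.2) 4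
        let moves :=
          if diff = 1 then st.1 ++ ["R"]
          else if diff = 2 then st.1 ++ ["R", "R"]
          else if diff = 3 then st.1 ++ ["L"] else st.1
        (moves ++ ["F"], needed))
      = (fun st i => pvStepA st (PySem.List.pyGetD path_coords i (0, 0))
                               (PySem.List.pyGetD path_coords (i + 1) (0, 0))) from rfl]
    rw [pvFold_range_eq_adjFold, pvAdjFold_eq_foldB]
    rfl
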